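-- pv_equiv track=rewrite | github.com/MarkSon-42/Team_ALGO | jongwon/172927. 광물 캐기/(1차 fail) 광물캐기.py | solution
-- ===== SOURCE A (Python) =====
-- from collections import deque
--
-- def solution(picks, minerals):
--     mine = deque() # ['dia', 'iron', 'iron', 'iron', 'stone', 'stone']
--     pick = ["dia", "iron", "stone"]
--     k = -1
--     for i in picks:
--         k += 1
--         for j in range(i):
--             mine.append(pick[k])
--     minerals = deque(minerals)
--     fatigability = 0
--     mine_pick = ''
--     for l in range(len(mine)):
--         while mine or minerals:
--             if len(mine) == 0:
--                 break
--             mine_pick = mine[l]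
--             mine.popleft()
--             for m in range(5):
--                 if len(minerals) == 0:
--                     break
--                 if mine_pick == "dia":
--                     minerals.popleft()
--                     fatigability += 1
--                 elif mine_pick == "iron":
--                     if minerals[0] == 'diamond':
--                         fatigability += 5
--                         minerals.popleft()
--                     else:
--                         fatigability += 1
--                         minerals.popleft()
--                 else:
--                     if minerals[0] == "diamond":
--                         fatigability += 25
--                         minerals.popleft()
--                     elif minerals[0] == "iron":
--                         fatigability += 5
--                         minerals.popleft()
--                     else:
--                         fatigability += 1
--                         minerals.popleft()
--     return fatigability
-- ===== SOURCE B (Python) =====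
-- def solution(picks, minerals):
--     labels = [name for name, n in zip(("dia", "iron", "stone"), picks) for _ in range(n)]
--     total = 0
--     rest = list(minerals)
--     for label in labels:
--         chunk, rest = rest[:5], rest[5:]
--         d = chunk.count("diamond")
--         i = chunk.count("iron")
--         if label == "dia":
--             total += len(chunk)
--         elif label == "iron":
--             total += 5 * d + (len(chunk) - d)
--         else:
--             total += 25 * d + 5 * i + (len(chunk) - d - i)
--     return total
-- ===== Notes on version B (the rewrite author's own statement) =====
-- stated objective: simpler
-- what changed: Replaces A's deques, redundant outer for-over-range with nested while and per-mineral if/elif popping by a flat pick-label list zipped from the three pick names, then one fold over labels taking 5-element slices of the remaining minerals and charging each slice with a closed count-based formula (5/25 per diamond etc.).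
import Mathlib
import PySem

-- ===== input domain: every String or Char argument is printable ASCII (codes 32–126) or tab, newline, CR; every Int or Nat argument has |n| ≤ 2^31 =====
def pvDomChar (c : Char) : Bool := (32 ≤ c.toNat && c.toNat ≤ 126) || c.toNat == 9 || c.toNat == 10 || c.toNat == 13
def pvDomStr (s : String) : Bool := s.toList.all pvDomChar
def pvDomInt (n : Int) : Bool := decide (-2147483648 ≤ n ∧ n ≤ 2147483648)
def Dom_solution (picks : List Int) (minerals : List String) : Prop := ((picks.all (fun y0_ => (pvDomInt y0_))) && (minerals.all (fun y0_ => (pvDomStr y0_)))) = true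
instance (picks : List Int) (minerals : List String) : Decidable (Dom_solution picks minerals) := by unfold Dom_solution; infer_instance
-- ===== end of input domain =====

-- B replaces A's deque simulation (outer for-over-range + while + per-mineral if/elif pops)
-- by one fold over the pick-label list with a count-based closed formula per 5-mineral slice;
-- objective: simpler.

-- ===== PORT A =====
-- for i in picks: k += 1; for j in range(i): mine.append(pick[k])
-- (pick[k] out of range = IndexError, excluded by Pre_; the port defaults to "" there)
def pvBuildMine : List Int → Int → List String → List String
  | [], _, mine => mine
  | i :: rest, k, mine =>
      pvBuildMine rest (k + 1)
        ((PySem.List.pyRange 0 i 1).foldl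
          (fun m _ => m ++ [(PySem.List.pyGet? ["dia", "iron", "stone"] (k + 1)).getD ""]) mine)

-- for m in range(5): if len(minerals)==0: break; … pop one mineral, add fatigue
def pvInnerStep (mine_pick : String) (st : List String × Int) (_ : Int) : List String × Int :=
  match st with
  | ([], fat) => ([], fat)
  | (x :: rest, fat) =>
      if mine_pick == "dia" then (rest, fat + 1)
      else if mine_pick == "iron" then
        if x == "diamond" then (rest, fat + 5) else (rest, fat + 1)
      else
        if x == "diamond" then (rest, fat + 25)
        else if x == "iron" then (rest, fat + 5)
        else (rest, fat + 1)

def pvInner (mine_pick : String) (st : List String × Int) : List String × Int :=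
  (PySem.List.pyRange 0 5 1).foldl (pvInnerStep mine_pick) st

-- while mine or minerals: if len(mine)==0: break; mine_pick = mine[l]; mine.popleft(); for m in range(5): …
def pvWhile (l : Int) : List String → List String → Int → List String × List String × Int
  | [], minerals, fat => ([], minerals, fat)
  | p :: rest, minerals, fat =>
      let mine_pick := (PySem.List.pyGet? (p :: rest) l).getD ""
      let st := pvInner mine_pick (minerals, fat)
      pvWhile l rest st.1 st.2

def solution (picks : List Int) (minerals : List String) : Int :=
  let mine := pvBuildMine picks (-1) []
  let st := (List.range mine.length).foldl
    (fun (st : List String × List String × Int) (l : Nat) => pvWhile (Int.ofNat l) st.1 st.2.1 st.2.2)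
    (mine, minerals, 0)
  st.2.2

-- ===== PORT B =====
def pvChunkFat (label : String) (chunk : List String) : Int :=
  let d : Int := (PySem.List.count chunk "diamond" : Int)
  let i : Int := (PySem.List.count chunk "iron" : Int)
  if label == "dia" then (chunk.length : Int)
  else if label == "iron" then 5 * d + ((chunk.length : Int) - d)
  else 25 * d + 5 * i + ((chunk.length : Int) - d - i)

def pvLabels (picks : List Int) : List String :=
  (List.zip ["dia", "iron", "stone"] picks).flatMap
    (fun p => (PySem.List.pyRange 0 p.2 1).map (fun _ => p.1))

-- chunk, rest = rest[:5], rest[5:]; total += closed formula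
def pvBStep (st : Int × List String) (label : String) : Int × List String :=
  let chunk := PySem.List.slice st.2 none (some 5)
  let rest := PySem.List.slice st.2 (some 5) none
  (st.1 + pvChunkFat label chunk, rest)

def solution_alt (picks : List Int) (minerals : List String) : Int :=
  ((pvLabels picks).foldl pvBStep (0, minerals)).1

-- ===== PRECONDITION & SPEC =====
-- Pre_ excludes exactly the inputs where A raises IndexError: a positive pick count past the
-- three pick names (pick[k] with k > 2).
def Pre_solution (picks : List Int) (minerals : List String) : Prop :=
  ∀ x ∈ picks.drop 3, x ≤ 0

instance (picks : List Int) (minerals : List String) : Decidable (Pre_solution picks minerals) := by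
  unfold Pre_solution; infer_instance

def pvWitness_solution : List Int × List String :=
  ([1, 2, 2], ["diamond", "iron", "stone", "stone", "iron", "diamond", "stone"])

def Spec_solution (picks : List Int) (minerals : List String) (out : Int) : Prop := out = solution_alt picks minerals
instance (picks : List Int) (minerals : List String) (out : Int) : Decidable (Spec_solution picks minerals out) := by unfold Spec_solution; infer_instance

-- ===== CLAIM (what is proved, stated in full; the proofs are below) =====
def Claim_equal_solution : Prop := ∀ (picks : List Int) (minerals : List String), Dom_solution picks minerals → Pre_solution picks minerals → Spec_solution picks minerals (solution picks minerals)

-- ===== LEMMAS AND PROOFS =====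

-- per-mineral fatigue, mirroring A's if/elif chain
def pvElemFat (mine_pick x : String) : Int :=
  if mine_pick == "dia" then 1
  else if mine_pick == "iron" then (if x == "diamond" then 5 else 1)
  else if x == "diamond" then 25 else if x == "iron" then 5 else 1

theorem pvInnerStep_cons (p x : String) (rest : List String) (fat : Int) (e : Int) :
    pvInnerStep p (x :: rest, fat) e = (rest, fat + pvElemFat p x) := by
  simp only [pvInnerStep, pvElemFat]
  split_ifs <;> rfl

theorem pvFold_innerStep (p : String) (L : List Int) :
    ∀ (ms : List String) (fat : Int),
      L.foldl (pvInnerStep p) (ms, fat)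
        = (ms.drop L.length, fat + ((ms.take L.length).map (pvElemFat p)).sum) := by
  induction L with
  | nil => intro ms fat; simp
  | cons e L ih =>
      intro ms fat
      cases ms with
      | nil =>
          simp only [List.foldl_cons, pvInnerStep, ih, List.drop_nil, List.take_nil]
      | cons x rest =>
          simp only [List.foldl_cons, pvInnerStep_cons, ih]
          simp [add_assoc]

theorem pvInner_eq (p : String) (ms : List String) (fat : Int) :
    pvInner p (ms, fat) = (ms.drop 5, fat + ((ms.take 5).map (pvElemFat p)).sum) := by
  have h : (PySem.List.pyRange 0 5 1) = [0, 1, 2, 3, 4] := by decide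
  have := pvFold_innerStep p (PySem.List.pyRange 0 5 1) ms fat
  simpa [pvInner, h] using this

theorem pvSum_elemFat (p : String) (chunk : List String) :
    (chunk.map (pvElemFat p)).sum = pvChunkFat p chunk := by
  induction chunk with
  | nil =>
      simp [pvChunkFat, PySem.List.count]
  | cons x rest ih =>
      by_cases hd : x == "diamond"
      · have hi : (x == "iron") = false := by rw [beq_iff_eq.mp hd]; decide
        simp only [List.map_cons, List.sum_cons, ih, pvChunkFat, pvElemFat,
          PySem.List.count_eq, List.count_cons, List.length_cons, hd, hi]
        split_ifs <;> (try (exfalso; assumption)) <;> push_cast <;> omega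
      · by_cases hi : x == "iron" <;>
          · simp only [List.map_cons, List.sum_cons, ih, pvChunkFat, pvElemFat,
              PySem.List.count_eq, List.count_cons, List.length_cons, hd, hi]
            split_ifs <;> (try (exfalso; assumption)) <;> push_cast <;> omega

theorem pvBStep_eq (fat : Int) (ms : List String) (p : String) :
    pvBStep (fat, ms) p = (fat + ((ms.take 5).map (pvElemFat p)).sum, ms.drop 5) := by
  have hc : PySem.List.slice ms none (some (5 : Int)) = ms.take 5 := by
    rw [PySem.List.slice_to ms (by norm_num)]; rfl
  have hr : PySem.List.slice ms (some (5 : Int)) none = ms.drop 5 := by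
    rw [PySem.List.slice_from ms (by norm_num)]; rfl
  simp only [pvBStep, hc, hr]
  rw [pvSum_elemFat p (List.take 5 ms)]

theorem pvWhile_eq_bfold (mine : List String) :
    ∀ (ms : List String) (fat : Int),
      pvWhile 0 mine ms fat
        = ([], (mine.foldl pvBStep (fat, ms)).2, (mine.foldl pvBStep (fat, ms)).1) := by
  induction mine with
  | nil => intro ms fat; simp [pvWhile]
  | cons p rest ih =>
      intro ms fat
      have hp : (PySem.List.pyGet? (p :: rest) (0 : Int)).getD "" = p := by
        rw [PySem.List.pyGet?_zero]; rfl
      simp only [pvWhile, hp, pvInner_eq, List.foldl_cons, pvBStep_eq]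
      exact ih (ms.drop 5) (fat + ((ms.take 5).map (pvElemFat p)).sum)

theorem pvBuildMine_nonpos (picks : List Int) :
    ∀ (k : Int) (mine : List String), (∀ x ∈ picks, x ≤ 0) →
      pvBuildMine picks k mine = mine := by
  induction picks with
  | nil => intro k mine _; rfl
  | cons i rest ih =>
      intro k mine h
      have hi : i ≤ 0 := h i (by simp)
      simp only [pvBuildMine, PySem.List.pyRange_one_eq_nil hi, List.foldl_nil]
      exact ih (k + 1) mine (fun x hx => h x (by simp [hx]))

theorem pvRep (i : Int) (s : String) (mine : List String) :
    (PySem.List.pyRange 0 i 1).foldl (fun m _ => m ++ [s]) mine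
      = mine ++ (PySem.List.pyRange 0 i 1).map (fun _ => s) := by
  rw [PySem.List.foldl_append_singleton_eq_map]

theorem pvMine_eq_labels (picks : List Int) (h : ∀ x ∈ picks.drop 3, x ≤ 0) :
    pvBuildMine picks (-1) [] = pvLabels picks := by
  match picks with
  | [] => rfl
  | [a] =>
      simp [pvBuildMine, pvLabels]
  | [a, b] =>
      simp [pvBuildMine, pvLabels]
  | a :: b :: c :: rest =>
      have hrest : ∀ x ∈ rest, x ≤ 0 := by simpa using h
      simp only [pvBuildMine, pvRep]
      rw [pvBuildMine_nonpos rest _ _ hrest]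
      simp [pvLabels]

-- ===== VERDICT (by name: the statement is the Claim_ definition above) =====
theorem solution_spec : Claim_equal_solution := by
  intro picks minerals _ hpre
  unfold Spec_solution solution solution_alt
  rw [pvMine_eq_labels picks hpre]
  cases hL : pvLabels picks with
  | nil => simp
  | cons p rest =>
      show ((List.range (p :: rest).length).foldl
          (fun (st : List String × List String × Int) (l : Nat) => pvWhile (Int.ofNat l) st.1 st.2.1 st.2.2)
          ((p :: rest), minerals, 0)).2.2 = (List.foldl pvBStep (0, minerals) (p :: rest)).1
      rw [List.length_cons, List.range_succ_eq_map]
      simp only [List.foldl_cons, List.foldl_map]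
      rw [show (Int.ofNat 0) = (0 : Int) from rfl]
      rw [pvWhile_eq_bfold (p :: rest) minerals 0]
      have hid : ∀ (g : Nat → Int) (L : List Nat) (ms : List String) (fat : Int),
          L.foldl (fun (st : List String × List String × Int) (l : Nat) =>
            pvWhile (g l) st.1 st.2.1 st.2.2) ([], ms, fat) = ([], ms, fat) := by
        intro g L
        induction L with
        | nil => intro ms fat; rfl
        | cons x L ih => intro ms fat; rw [List.foldl_cons]; exact ih ms fat
      rw [hid]
      simp [List.foldl_cons]
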